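-- pv_equiv track=rewrite | github.com/Fatimakhan0/AITerminalAgent | src/python/agent.py | parse_ai_code
-- ===== SOURCE A (Python) =====
-- def parse_ai_code(ai_output):
--
--     lines = ai_output.split("\n")
--
--     filename = None
--     code_lines = []
--     capture = False
--
--     for line in lines:
--
--         if line.startswith("FILE:"):
--             filename = line.replace("FILE:", "").strip()
--
--         elif line.startswith("CODE:"):
--             capture = True
--             continue
--
--         elif capture:
--             # Strip markdown code fences if present
--             if line.strip().startswith("```"):
--                 continue
--             code_lines.append(line)
--
--     code = "\n".join(code_lines).strip("\n")
--
--     return filename, code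
-- ===== SOURCE B (Python) =====
-- def parse_ai_code(ai_output):
--     lines = ai_output.split("\n")
--     filename = next((l.replace("FILE:", "").strip()
--                      for l in reversed(lines) if l.startswith("FILE:")), None)
--     try:
--         idx = next(i for i, l in enumerate(lines) if l.startswith("CODE:"))
--     except StopIteration:
--         return filename, ""
--     code_lines = [l for l in lines[idx + 1:]
--                   if not l.startswith("FILE:")
--                   and not l.startswith("CODE:")
--                   and not l.strip().startswith("```")]
--     return filename, "\n".join(code_lines).strip("\n")
-- ===== Notes on version B (the rewrite author's own statement) =====
-- stated objective: alternative
-- what changed: Replaced A's single interleaved capture-flag loop with two independent scans: a reversed search for the last FILE: line, and a first-CODE:-index followed by slice-and-filter for the code lines.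
import Mathlib
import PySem

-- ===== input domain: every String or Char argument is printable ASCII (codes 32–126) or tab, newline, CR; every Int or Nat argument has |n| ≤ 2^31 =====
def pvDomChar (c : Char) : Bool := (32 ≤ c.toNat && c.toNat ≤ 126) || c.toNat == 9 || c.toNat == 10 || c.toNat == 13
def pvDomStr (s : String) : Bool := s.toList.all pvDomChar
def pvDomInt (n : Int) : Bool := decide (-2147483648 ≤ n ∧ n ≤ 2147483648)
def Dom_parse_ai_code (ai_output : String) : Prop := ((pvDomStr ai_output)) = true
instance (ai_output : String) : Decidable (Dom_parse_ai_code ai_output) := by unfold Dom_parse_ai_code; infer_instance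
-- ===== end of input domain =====

-- B replaces A's single capture-flag loop by two independent scans (reversed search for the
-- last FILE: line, first-CODE:-index then slice-and-filter); objective: alternative decomposition.

-- ===== PORT A =====
-- the loop body of A's for-loop, state = (filename, code_lines, capture)
def pvStepA (st : Option String × List String × Bool) (line : String) :
    Option String × List String × Bool :=
  if PySem.Str.startswith line "FILE:" then
    (some (PySem.Str.strip (PySem.Str.replace line "FILE:" "")), st.2.1, st.2.2)
  else if PySem.Str.startswith line "CODE:" then
    (st.1, st.2.1, true)
  else if st.2.2 then
    (if PySem.Str.startswith (PySem.Str.strip line) "```" then st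
     else (st.1, st.2.1 ++ [line], st.2.2))
  else st

def parse_ai_code (ai_output : String) : Option String × String :=
  let lines := (PySem.Str.split? ai_output "\n").getD []
  let st := lines.foldl pvStepA (none, [], false)
  let code := PySem.Str.stripChars (PySem.Str.join "\n" st.2.1) "\n"
  (st.1, code)

-- ===== PORT B =====
def pvKeepB (l : String) : Bool :=
  !PySem.Str.startswith l "FILE:" && !PySem.Str.startswith l "CODE:" &&
    !PySem.Str.startswith (PySem.Str.strip l) "```"

def parse_ai_code_alt (ai_output : String) : Option String × String :=
  let lines := (PySem.Str.split? ai_output "\n").getD []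
  let filename := (lines.reverse.find? (fun l => PySem.Str.startswith l "FILE:")).map
      (fun l => PySem.Str.strip (PySem.Str.replace l "FILE:" ""))
  match lines.findIdx? (fun l => PySem.Str.startswith l "CODE:") with
  | none => (filename, "")
  | some idx =>
      let code_lines := (lines.drop (idx + 1)).filter pvKeepB
      (filename, PySem.Str.stripChars (PySem.Str.join "\n" code_lines) "\n")

-- ===== PRECONDITION & SPEC =====
def Spec_parse_ai_code (ai_output : String) (out : Option String × String) : Prop := out = parse_ai_code_alt ai_output
instance (ai_output : String) (out : Option String × String) : Decidable (Spec_parse_ai_code ai_output out) := by unfold Spec_parse_ai_code; infer_instance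

-- ===== CLAIM (what is proved, stated in full; the proofs are below) =====
def Claim_equal_parse_ai_code : Prop := ∀ (ai_output : String), Dom_parse_ai_code ai_output → Spec_parse_ai_code ai_output (parse_ai_code ai_output)

-- ===== LEMMAS AND PROOFS =====

-- a line cannot start with both "FILE:" and "CODE:"
theorem pv_file_not_code (l : List Char)
    (h : PySem.Chars.startswith l ['F', 'I', 'L', 'E', ':'] = true) :
    PySem.Chars.startswith l ['C', 'O', 'D', 'E', ':'] = false := by
  by_contra hc
  simp only [Bool.not_eq_false] at hc
  rw [PySem.Chars.startswith_iff] at h hc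
  rcases h with ⟨t1, h1⟩
  rcases hc with ⟨t2, h2⟩
  rw [← h2] at h1
  simp at h1

-- the filename component of A's fold: the last FILE: line wins, else the initial value
theorem pv_fname (lines : List String) (st : Option String × List String × Bool) :
    (lines.foldl pvStepA st).1 =
      ((lines.reverse.find? (fun l => PySem.Str.startswith l "FILE:")).map
        (fun l => PySem.Str.strip (PySem.Str.replace l "FILE:" ""))).or st.1 := by
  induction lines generalizing st with
  | nil => simp
  | cons l ls ih =>
    simp only [List.foldl_cons, List.reverse_cons, List.find?_append, ih]
    by_cases hf : PySem.Chars.startswith l.toList ['F', 'I', 'L', 'E', ':'] = true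
    · simp [pvStepA, hf]
    · by_cases hc : PySem.Chars.startswith l.toList ['C', 'O', 'D', 'E', ':'] = true
      · simp [pvStepA, hf, hc]
      · by_cases hcap : st.2.2 = true
        · by_cases hb : PySem.Chars.startswith (PySem.Chars.strip l.toList) ['`', '`', '`'] = true
          · simp [pvStepA, hf, hc, hcap, hb]
          · simp [pvStepA, hf, hc, hcap, hb]
        · simp only [Bool.not_eq_true] at hcap
          simp [pvStepA, hf, hc, hcap]

-- the code_lines component once capture is on: appends exactly the kept lines
theorem pv_code_true (lines : List String) (f0 : Option String) (cl : List String) :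
    (lines.foldl pvStepA (f0, cl, true)).2.1 = cl ++ lines.filter pvKeepB := by
  induction lines generalizing f0 cl with
  | nil => simp
  | cons l ls ih =>
    by_cases hf : PySem.Chars.startswith l.toList ['F', 'I', 'L', 'E', ':'] = true
    · simp [List.foldl_cons, pvStepA, pvKeepB, hf, ih]
    · by_cases hc : PySem.Chars.startswith l.toList ['C', 'O', 'D', 'E', ':'] = true
      · simp [List.foldl_cons, pvStepA, pvKeepB, hf, hc, ih]
      · by_cases hb : PySem.Chars.startswith (PySem.Chars.strip l.toList) ['`', '`', '`'] = true
        · simp [List.foldl_cons, pvStepA, pvKeepB, hf, hc, hb, ih]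
        · simp [List.foldl_cons, pvStepA, pvKeepB, hf, hc, hb, ih]

-- the code_lines component from capture off: empty until the first CODE: line, then kept lines
theorem pv_code_false (lines : List String) (f0 : Option String) :
    (lines.foldl pvStepA (f0, [], false)).2.1 =
      (match lines.findIdx? (fun l => PySem.Str.startswith l "CODE:") with
       | none => []
       | some idx => (lines.drop (idx + 1)).filter pvKeepB) := by
  induction lines generalizing f0 with
  | nil => simp
  | cons l ls ih =>
    by_cases hc : PySem.Chars.startswith l.toList ['C', 'O', 'D', 'E', ':'] = true
    · have hf : PySem.Chars.startswith l.toList ['F', 'I', 'L', 'E', ':'] = false := by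
        by_contra h
        simp only [Bool.not_eq_false] at h
        exact absurd hc (by simp [pv_file_not_code l.toList h])
      simp [List.foldl_cons, pvStepA, hf, hc, List.findIdx?_cons, pv_code_true]
    · by_cases hf : PySem.Chars.startswith l.toList ['F', 'I', 'L', 'E', ':'] = true
      · simp only [List.foldl_cons]
        rw [show pvStepA (f0, [], false) l =
              (some (PySem.Str.strip (PySem.Str.replace l "FILE:" "")), [], false) by
            simp [pvStepA, hf]]
        rw [ih (some (PySem.Str.strip (PySem.Str.replace l "FILE:" "")))]
        simp [List.findIdx?_cons, hc]
        cases h : ls.findIdx? (fun l => PySem.Chars.startswith l.toList ['C', 'O', 'D', 'E', ':']) <;> simp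
      · simp only [List.foldl_cons]
        rw [show pvStepA (f0, [], false) l = (f0, [], false) by simp [pvStepA, hf, hc]]
        rw [ih f0]
        simp [List.findIdx?_cons, hc]
        cases h : ls.findIdx? (fun l => PySem.Chars.startswith l.toList ['C', 'O', 'D', 'E', ':']) <;> simp

-- ===== VERDICT (by name: the statement is the Claim_ definition above) =====
theorem parse_ai_code_spec : Claim_equal_parse_ai_code := by
  intro s _
  unfold Spec_parse_ai_code parse_ai_code parse_ai_code_alt
  simp only []
  set lines := (PySem.Str.split? s "\n").getD [] with hl
  cases h : lines.findIdx? (fun l => PySem.Str.startswith l "CODE:") with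
  | none =>
      rw [Prod.ext_iff]
      constructor
      · have := pv_fname lines (none, [], false)
        simpa using this
      · have := pv_code_false lines none
        rw [h] at this
        simp at this ⊢
        simp [this]
        rfl
  | some idx =>
      rw [Prod.ext_iff]
      constructor
      · have := pv_fname lines (none, [], false)
        simpa using this
      · have := pv_code_false lines none
        rw [h] at this
        simp at this ⊢
        simp [this]
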